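-- pv_equiv track=rewrite | github.com/Kribashan/sensornetworks | sensor_networks.py | CheckForErr
-- ===== SOURCE A (Python) =====
-- def CheckForErr(data):
--     listErr = {}
--     for k, v in data.items():
--         if (-1 in v):
--             for i,x in enumerate(v):
--                 if (x == -1):
--                     listErr[k] = i
--     return listErr
-- ===== SOURCE B (Python) =====
-- def CheckForErr(data):
--     listErr = {}
--     for k, v in data.items():
--         for i in range(len(v) - 1, -1, -1):
--             if v[i] == -1:
--                 listErr[k] = i
--                 break
--     return listErr
-- ===== Notes on version B (the rewrite author's own statement) =====
-- stated objective: alternative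
-- what changed: B replaces A's membership test plus full forward enumerate with repeated overwriting by a single reverse index scan (range(len(v)-1,-1,-1)) that breaks at the first -1 found from the end.
import Mathlib
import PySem

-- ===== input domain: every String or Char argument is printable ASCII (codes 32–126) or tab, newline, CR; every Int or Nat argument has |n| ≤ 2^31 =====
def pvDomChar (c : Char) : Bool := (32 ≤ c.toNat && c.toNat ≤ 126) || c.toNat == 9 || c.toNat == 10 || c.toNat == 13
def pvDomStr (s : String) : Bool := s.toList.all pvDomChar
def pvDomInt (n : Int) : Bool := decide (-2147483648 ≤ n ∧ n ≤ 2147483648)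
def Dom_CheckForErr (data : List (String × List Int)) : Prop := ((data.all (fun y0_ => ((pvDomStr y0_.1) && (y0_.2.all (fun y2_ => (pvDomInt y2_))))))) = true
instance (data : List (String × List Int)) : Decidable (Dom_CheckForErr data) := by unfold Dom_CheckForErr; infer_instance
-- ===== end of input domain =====

-- B replaces A's membership test plus forward enumerate (overwriting on every -1) with one
-- reverse index scan that breaks at the first -1 from the end; alternative decomposition, same cost.


-- ===== PORT A =====
-- for k, v in data.items(): if -1 in v: for i, x in enumerate(v): if x == -1: listErr[k] = i
def CheckForErr (data : List (String × List Int)) : List (String × Int) :=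
  (data.foldl
    (fun listErr kv =>
      if (-1 : Int) ∈ kv.2 then
        (PySem.List.enumerate kv.2).foldl
          (fun d ix => if ix.2 == (-1 : Int) then d.insert kv.1 ix.1 else d) listErr
      else listErr)
    PySem.Dict.empty).items

-- ===== PORT B =====
-- for k, v in data.items(): for i in range(len(v)-1, -1, -1): if v[i] == -1: listErr[k] = i; break
-- (the for-with-break is ported as find? over the descending range)
def CheckForErr_alt (data : List (String × List Int)) : List (String × Int) :=
  (data.foldl
    (fun listErr kv =>
      match (PySem.List.pyRange ((kv.2.length : Int) - 1) (-1) (-1)).find?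
              (fun i => PySem.List.pyGet? kv.2 i == some (-1 : Int)) with
      | some i => listErr.insert kv.1 i
      | none => listErr)
    PySem.Dict.empty).items

-- ===== PRECONDITION & SPEC =====
def Spec_CheckForErr (data : List (String × List Int)) (out : List (String × Int)) : Prop := out = CheckForErr_alt data
instance (data : List (String × List Int)) (out : List (String × Int)) : Decidable (Spec_CheckForErr data out) := by unfold Spec_CheckForErr; infer_instance

-- ===== CLAIM (what is proved, stated in full; the proofs are below) =====
def Claim_equal_CheckForErr : Prop := ∀ (data : List (String × List Int)), Dom_CheckForErr data → Spec_CheckForErr data (CheckForErr data)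

-- ===== LEMMAS AND PROOFS =====

-- no find?-congruence lemma exists in Mathlib/PySem; proved here
theorem find?_congr_of_mem {α : Type} (l : List α) (p q : α → Bool)
    (h : ∀ x ∈ l, p x = q x) : l.find? p = l.find? q := by
  induction l with
  | nil => rfl
  | cons a l ih =>
      simp only [List.find?_cons, h a (by simp)]
      cases hq : q a with
      | true => rfl
      | false => exact ih (fun x hx => h x (by simp [hx]))

-- A's inner loop only ever inserts at key k, so a final overwrite at k collapses it.
theorem foldA_insert_collapse (k : String) (l : List (Int × Int)) (d : PySem.Dict String Int) (w : Int) :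
    ((l.foldl (fun d ix => if ix.2 == (-1 : Int) then d.insert k ix.1 else d) d).insert k w)
      = d.insert k w := by
  induction l generalizing d with
  | nil => rfl
  | cons p rest ih =>
      simp only [List.foldl_cons]
      by_cases hp : p.2 == (-1 : Int)
      · rw [if_pos hp, ih, PySem.Dict.insert_insert_self]
      · rw [if_neg hp, ih]

-- The per-key step of A equals the per-key step of B.
theorem step_eq (k : String) (v : List Int) (d : PySem.Dict String Int) :
    (if (-1 : Int) ∈ v then
        (PySem.List.enumerate v).foldl
          (fun d ix => if ix.2 == (-1 : Int) then d.insert k ix.1 else d) d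
      else d)
    = (match (PySem.List.pyRange ((v.length : Int) - 1) (-1) (-1)).find?
              (fun i => PySem.List.pyGet? v i == some (-1 : Int)) with
        | some i => d.insert k i
        | none => d) := by
  induction v using List.reverseRecOn generalizing d with
  | nil =>
      simp [PySem.List.pyRange_neg_one_eq_nil]
  | append_singleton v x ih =>
      have hnn : (0 : Int) ≤ (v.length : Int) := Int.natCast_nonneg _
      have hlen : (((v ++ [x]).length : Int) - 1) = (v.length : Int) := by
        simp
      have hget : PySem.List.pyGet? (v ++ [x]) ((v.length : Int)) = some x := by
        rw [PySem.List.pyGet?_natCast]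
        simp
      rw [hlen, PySem.List.pyRange_neg_one_cons (by omega)]
      by_cases hx : x = (-1 : Int)
      · subst hx
        rw [List.find?_cons_of_pos (by rw [hget]; rfl)]
        rw [if_pos (by simp : (-1 : Int) ∈ v ++ [(-1 : Int)])]
        rw [PySem.List.enumerate_append, List.foldl_append]
        simp only [PySem.List.enumerate_cons, PySem.List.enumerate_nil, List.foldl_cons,
          List.foldl_nil, zero_add]
        rw [if_pos (by rfl)]
        exact foldA_insert_collapse k (PySem.List.enumerate v) d ((v.length : Int))
      · have hfc : (PySem.List.pyRange ((v.length : Int) - 1) (-1) (-1)).find?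
              (fun i => PySem.List.pyGet? (v ++ [x]) i == some (-1 : Int))
            = (PySem.List.pyRange ((v.length : Int) - 1) (-1) (-1)).find?
              (fun i => PySem.List.pyGet? v i == some (-1 : Int)) := by
          apply find?_congr_of_mem
          intro i hi
          rw [PySem.List.mem_pyRange_neg_one] at hi
          have h0 : (0 : Int) ≤ i := by omega
          have hlt : i.toNat < v.length := by omega
          rw [PySem.List.pyGet?_of_nonneg _ h0, PySem.List.pyGet?_of_nonneg _ h0,
            List.getElem?_append_left hlt]
        rw [List.find?_cons_of_neg (by rw [hget]; simp [hx]), hfc, ← ih d]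
        by_cases hv : (-1 : Int) ∈ v
        · rw [if_pos (by simp [hv]), if_pos hv]
          rw [PySem.List.enumerate_append, List.foldl_append]
          simp only [PySem.List.enumerate_cons, PySem.List.enumerate_nil, List.foldl_cons,
            List.foldl_nil]
          rw [if_neg (by simp [hx])]
        · rw [if_neg (by simp [hv]; omega), if_neg hv]

theorem folds_eq (data : List (String × List Int)) :
    CheckForErr data = CheckForErr_alt data := by
  unfold CheckForErr CheckForErr_alt
  have hf : (fun (listErr : PySem.Dict String Int) (kv : String × List Int) =>
      if (-1 : Int) ∈ kv.2 then
        (PySem.List.enumerate kv.2).foldl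
          (fun d ix => if ix.2 == (-1 : Int) then d.insert kv.1 ix.1 else d) listErr
      else listErr)
    = (fun (listErr : PySem.Dict String Int) (kv : String × List Int) =>
      match (PySem.List.pyRange ((kv.2.length : Int) - 1) (-1) (-1)).find?
              (fun i => PySem.List.pyGet? kv.2 i == some (-1 : Int)) with
      | some i => listErr.insert kv.1 i
      | none => listErr) := by
    funext d kv
    exact step_eq kv.1 kv.2 d
  rw [hf]

-- ===== VERDICT (by name: the statement is the Claim_ definition above) =====
theorem CheckForErr_spec : Claim_equal_CheckForErr := by
  intro data _
  unfold Spec_CheckForErr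
  exact folds_eq data
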